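-- pv_equiv track=rewrite | github.com/vladan-stojnic/AdventOfCode | 2021/day18_sol.py | magnitude_step
-- ===== SOURCE A (Python) =====
-- from collections import deque
--
-- def magnitude_step(s_number):
--     open_stack = deque()
--     for idx, c in enumerate(s_number):
--         if c == "[":
--             open_stack.append(idx)
--         elif c == "]":
--             open_idx = open_stack.pop()
--             close_idx = idx
--             if not (
--                 ("[" in s_number[open_idx + 1 : close_idx])
--                 or ("]" in s_number[open_idx + 1 : close_idx])
--             ):
--                 current_pair = tuple(
--                     int(v)
--                     for v in s_number[open_idx + 1 : close_idx].split(",")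
--                 )
--                 val = 3 * current_pair[0] + 2 * current_pair[1]
--                 return (
--                     True,
--                     s_number[:open_idx] + str(val) + s_number[close_idx + 1 :],
--                 )
--
--     return False, s_number
-- ===== SOURCE B (Python) =====
-- def magnitude_step(s_number):
--     close = s_number.find("]")
--     if close == -1:
--         return False, s_number
--     open_ = s_number.rfind("[", 0, close)
--     pair = [int(v) for v in s_number[open_ + 1 : close].split(",")]
--     val = 3 * pair[0] + 2 * pair[1]
--     return True, s_number[:open_] + str(val) + s_number[close + 1 :]
-- ===== Notes on version B (the rewrite author's own statement) =====
-- stated objective: simpler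
-- what changed: B drops A's per-character enumerate loop with a deque of open-bracket indices and instead locates the leaf directly with C-level string primitives: the first ']' via str.find, its matching '[' via str.rfind (the region between is necessarily bracket-free), then one split and one splice.
-- outside the precondition, e.g. on magnitude_step(']'): A raises IndexError, B raises ValueError; on magnitude_step('[1]'): A raises IndexError, B raises IndexError; on magnitude_step('[a,b]'): A raises ValueError, B raises ValueError
import Mathlib
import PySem

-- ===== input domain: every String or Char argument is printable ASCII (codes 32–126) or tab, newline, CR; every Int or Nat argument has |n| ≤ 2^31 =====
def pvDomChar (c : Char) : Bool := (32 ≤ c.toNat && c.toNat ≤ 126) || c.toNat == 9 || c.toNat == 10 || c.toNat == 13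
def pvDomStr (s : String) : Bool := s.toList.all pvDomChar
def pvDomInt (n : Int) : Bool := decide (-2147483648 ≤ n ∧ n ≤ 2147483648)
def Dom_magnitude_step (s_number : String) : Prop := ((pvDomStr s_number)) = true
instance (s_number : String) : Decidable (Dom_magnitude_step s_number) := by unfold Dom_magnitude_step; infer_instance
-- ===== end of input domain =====

-- B replaces A's index/stack scan by find/rfind: the first ']' always closes a
-- bracket-free leaf, whose '[' is the last one before it (objective: simpler).

-- ===== PORT A =====
-- A's for-loop with its deque of open-bracket indices (top of stack = head).
-- Where Python raises (pop from empty deque, int() ValueError, pair[1] IndexError)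
-- the port returns (false, s_number); those inputs are excluded by Pre_.
def magAux (s_number : String) (rest : List Char) (idx : Nat) (stack : List Nat) : Bool × String :=
  match rest with
  | [] => (false, s_number)
  | c :: cs =>
    if c = '[' then
      magAux s_number cs (idx + 1) (idx :: stack)
    else if c = ']' then
      match stack with
      | [] => (false, s_number)  -- Python: IndexError (outside Pre_)
      | open_idx :: stack' =>
        let close_idx := idx
        let mid := PySem.List.slice s_number.toList (some ((open_idx : Int) + 1)) (some (close_idx : Int))
        if PySem.Chars.isIn ['['] mid || PySem.Chars.isIn [']'] mid then
          magAux s_number cs (idx + 1) stack'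
        else
          match (PySem.Chars.splitOn mid [',']).mapM PySem.Int.ofChars? with
          | none => (false, s_number)  -- Python: ValueError (outside Pre_)
          | some vals =>
            match vals with
            | v0 :: v1 :: _ =>
              (true, String.ofList (PySem.List.slice s_number.toList none (some (open_idx : Int)) ++
                     (PySem.Int.toStr (3 * v0 + 2 * v1)).toList ++
                     PySem.List.slice s_number.toList (some ((close_idx : Int) + 1)) none))
            | _ => (false, s_number)  -- Python: IndexError (outside Pre_)
    else
      magAux s_number cs (idx + 1) stack

def magnitude_step (s_number : String) : Bool × String :=
  magAux s_number s_number.toList 0 []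

-- ===== PORT B =====
def magnitude_step_alt (s_number : String) : Bool × String :=
  let close := PySem.Str.find s_number "]"
  if close = -1 then (false, s_number)
  else
    let open_ := PySem.Str.rfindFrom s_number "[" 0 (some close)
    let mid := PySem.List.slice s_number.toList (some (open_ + 1)) (some close)
    match (PySem.Chars.splitOn mid [',']).mapM PySem.Int.ofChars? with
    | none => (false, s_number)  -- Python: int() ValueError (outside Pre_)
    | some vals =>
      match vals with
      | v0 :: v1 :: _ =>
        (true, String.ofList (PySem.List.slice s_number.toList none (some open_) ++
               (PySem.Int.toStr (3 * v0 + 2 * v1)).toList ++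
               PySem.List.slice s_number.toList (some (close + 1)) none))
      | _ => (false, s_number)  -- Python: IndexError (outside Pre_)

-- ===== PRECONDITION & SPEC =====
-- the index of the last '[' strictly before position j, if any
def lastOpenBefore (cs : List Char) (j : Nat) : Option Nat :=
  ((List.range j).filter (fun i => cs[i]? = some '[')).getLast?

-- Pre_ excludes exactly the inputs where Python A raises: a first ']' with no '['
-- before it (IndexError on pop), or a leaf whose comma-split parts are not all
-- ints (ValueError) or number fewer than two (IndexError).
def Pre_magnitude_step (s_number : String) : Prop :=
  let cs := s_number.toList
  ']' ∈ cs →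
    (lastOpenBefore cs (cs.idxOf ']')).isSome = true ∧
    (let o := (lastOpenBefore cs (cs.idxOf ']')).getD 0
     let parts := PySem.Chars.splitOn ((cs.take (cs.idxOf ']')).drop (o + 1)) [',']
     2 ≤ parts.length ∧ ∀ p ∈ parts, (PySem.Int.ofChars? p).isSome = true)

instance (s_number : String) : Decidable (Pre_magnitude_step s_number) := by
  unfold Pre_magnitude_step; infer_instance

def pvWitness_magnitude_step : String := "[1,2]"

def Spec_magnitude_step (s_number : String) (out : Bool × String) : Prop := out = magnitude_step_alt s_number
instance (s_number : String) (out : Bool × String) : Decidable (Spec_magnitude_step s_number out) := by unfold Spec_magnitude_step; infer_instance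

-- ===== CLAIM (what is proved, stated in full; the proofs are below) =====
def Claim_equal_magnitude_step : Prop := ∀ (s_number : String), Dom_magnitude_step s_number → Pre_magnitude_step s_number → Spec_magnitude_step s_number (magnitude_step s_number)

-- ===== LEMMAS AND PROOFS =====


theorem singleton_prefix_iff {c : Char} {l : List Char} : [c] <+: l ↔ l[0]? = some c := by
  cases l with
  | nil => simp
  | cons a t => simp [List.cons_prefix_cons, eq_comm]

theorem singleton_infix_iff {c : Char} {l : List Char} : [c] <:+: l ↔ c ∈ l := by
  constructor
  · intro h; exact h.mem (by simp)
  · intro h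
    obtain ⟨i, hi, he⟩ := List.mem_iff_getElem.mp h
    refine ((singleton_prefix_iff.mpr ?_).isInfix).trans (List.drop_suffix i l).isInfix
    simp [List.getElem?_drop, List.getElem?_eq_getElem hi, he]

theorem pw_le_getLast {l : List Nat} {m : Nat} (hpw : l.Pairwise (· < ·))
    (hm : l.getLast? = some m) : ∀ x ∈ l, x ≤ m := by
  induction l with
  | nil => simp
  | cons a t ih =>
    intro x hx
    rcases List.mem_cons.mp hx with rfl | hx'
    · cases t with
      | nil => simp at hm; omega
      | cons b u =>
        have hmm : m ∈ b :: u := List.mem_of_getLast? (by simpa using hm)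
        have := (List.pairwise_cons.mp hpw).1 m hmm
        omega
    · cases t with
      | nil => simp at hx'
      | cons b u => exact ih (List.pairwise_cons.mp hpw).2 (by simpa using hm) x hx'

theorem idxOf_spec {c : Char} : ∀ (l : List Char), c ∈ l →
    l[List.idxOf c l]? = some c ∧ ∀ i < List.idxOf c l, l[i]? ≠ some c := by
  intro l hl
  induction l with
  | nil => simp at hl
  | cons a t ih =>
    by_cases hca : a = c
    · subst hca; simp [List.idxOf_cons_self]
    · have hct : c ∈ t := by
        rcases List.mem_cons.mp hl with h | h
        · exact absurd h.symm hca
        · exact h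
      have hix : List.idxOf c (a :: t) = List.idxOf c t + 1 := by
        rw [List.idxOf_cons]
        have : (a == c) = false := by simp [hca]
        simp [this]
      obtain ⟨h1, h2⟩ := ih hct
      refine ⟨by simpa [hix] using h1, ?_⟩
      intro i hi
      cases i with
      | zero => simp [hca]
      | succ j => simpa using h2 j (by omega)

-- first-occurrence characterisation of Chars.find for a single char
theorem find_singleton_eq (cs : List Char) (c : Char) (h : c ∈ cs) :
    PySem.Chars.find cs [c] = (List.idxOf c cs : Int) := by
  have hne : PySem.Chars.find cs [c] ≠ -1 := by
    rw [Ne, PySem.Chars.find_eq_neg_one_iff]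
    simp [singleton_infix_iff, h]
  have hnn : 0 ≤ PySem.Chars.find cs [c] := by
    rcases (PySem.Chars.neg_one_le_find cs [c]).lt_or_eq with h' | h'
    · omega
    · exact absurd h'.symm hne
  obtain ⟨hpre, hmin⟩ := PySem.Chars.find_spec (s := cs) (sub := [c]) hnn
  set f := (PySem.Chars.find cs [c]).toNat with hf
  have hcf : cs[f]? = some c := by
    have := singleton_prefix_iff.mp hpre
    simpa [List.getElem?_drop] using this
  obtain ⟨hidx, hidxmin⟩ := idxOf_spec cs h
  have h1 : ¬ (f < List.idxOf c cs) := fun hlt => hidxmin f hlt hcf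
  have h2 : ¬ (List.idxOf c cs < f) := by
    intro hlt
    exact hmin _ hlt (singleton_prefix_iff.mpr (by simpa [List.getElem?_drop] using hidx))
  omega

theorem rfindgo_singleton_eq (l : List Char) (c : Char) (o : Nat) (ho : l[o]? = some c) :
    ∀ k, o ≤ k → (∀ i, o < i → i ≤ k → l[i]? ≠ some c) →
      PySem.Chars.rfind.go l [c] k = (o : Int) := by
  intro k
  induction k with
  | zero =>
    intro hok _
    interval_cases o
    rw [PySem.Chars.rfind.go]
    have : [c].isPrefixOf l = true := by
      rw [List.isPrefixOf_iff_prefix]; exact singleton_prefix_iff.mpr ho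
    simp [this]
  | succ j ih =>
    intro hok hmax
    rw [PySem.Chars.rfind.go]
    by_cases heq : o = j + 1
    · subst heq
      have : [c].isPrefixOf (List.drop (j+1) l) = true := by
        rw [List.isPrefixOf_iff_prefix]
        exact singleton_prefix_iff.mpr (by simpa [List.getElem?_drop] using ho)
      simp [this]
    · have hol : o ≤ j := by omega
      have : [c].isPrefixOf (List.drop (j+1) l) = false := by
        rw [Bool.eq_false_iff, Ne, List.isPrefixOf_iff_prefix]
        intro hp
        exact hmax (j+1) (by omega) (by omega) (by simpa [List.getElem?_drop] using singleton_prefix_iff.mp hp)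
      simp [this]
      exact ih hol (fun i h1 h2 => hmax i h1 (by omega))

theorem rfindFrom_singleton (cs : List Char) (c : Char) (j o : Nat) (hj : j ≤ cs.length)
    (ho : o < j) (hoc : cs[o]? = some c) (hmax : ∀ i, o < i → i < j → cs[i]? ≠ some c) :
    PySem.Chars.rfindFrom cs [c] 0 (some (j : Int)) = (o : Int) := by
  have hlen : (List.take j cs).length = j := by simp [hj]
  have hgo : PySem.Chars.rfind.go (List.take j cs) [c] j = (o : Int) := by
    apply rfindgo_singleton_eq
    · simpa [List.getElem?_take, ho] using hoc
    · omega
    · intro i h1 h2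
      by_cases hij : i < j
      · simpa [List.getElem?_take, hij] using hmax i h1 hij
      · have : i = j := by omega
        subst this
        intro hcon
        rw [List.getElem?_eq_none_iff.mpr (by simp)] at hcon
        simp at hcon
  simp only [PySem.Chars.rfindFrom, PySem.Chars.rfind]
  have h1 : ¬ ((cs.length : Int) < (j : Int)) := by exact_mod_cast not_lt.mpr hj
  have h2 : ¬ ((j : Int) < 0) := by omega
  have h3 : ((o : Int)) ≠ -1 := by omega
  simp [h1, h2, hlen, hgo, h3]

theorem mapM_isSome {α β : Type} (f : α → Option β) : ∀ (l : List α),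
    (∀ p ∈ l, (f p).isSome = true) → ∃ vs, l.mapM f = some vs ∧ vs.length = l.length := by
  intro l h
  induction l with
  | nil => exact ⟨[], rfl, rfl⟩
  | cons a t ih =>
    obtain ⟨va, hva⟩ := Option.isSome_iff_exists.mp (h a (by simp))
    obtain ⟨vs, hvs, hlen⟩ := ih (fun p hp => h p (by simp [hp]))
    exact ⟨va :: vs, by simp [List.mapM_cons, hva, hvs], by simp [hlen]⟩

def opensRev (cs : List Char) (idx : Nat) : List Nat :=
  ((List.range idx).filter (fun i => cs[i]? = some '[')).reverse

theorem opensRev_succ (cs : List Char) (idx : Nat) :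
    opensRev cs (idx + 1) =
      if cs[idx]? = some '[' then idx :: opensRev cs idx else opensRev cs idx := by
  unfold opensRev
  rw [List.range_succ, List.filter_append]
  by_cases h : cs[idx]? = some '['
  · simp [h]
  · simp [h]

theorem magAux_no_close (s : String) : ∀ (rest : List Char), ']' ∉ rest →
    ∀ (idx : Nat) (stack : List Nat), magAux s rest idx stack = (false, s) := by
  intro rest
  induction rest with
  | nil => intro _ idx stack; simp [magAux]
  | cons c t ih =>
    intro h idx stack
    have hc2 : ¬ (c = ']') := by intro hc; exact h (by simp [hc])
    have ht : ']' ∉ t := fun hm => h (by simp [hm])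
    by_cases hc1 : c = '['
    · have step : magAux s (c :: t) idx stack = magAux s t (idx + 1) (idx :: stack) := by
        conv_lhs => rw [magAux.eq_def]
        simp [hc1]
      rw [step]; exact ih ht (idx + 1) (idx :: stack)
    · have step : magAux s (c :: t) idx stack = magAux s t (idx + 1) stack := by
        conv_lhs => rw [magAux.eq_def]
        simp [hc1, hc2]
      rw [step]; exact ih ht (idx + 1) stack

theorem magAux_reaches (s : String) (j : Nat) (hj : s.toList[j]? = some ']')
    (hfirst : ∀ i < j, s.toList[i]? ≠ some ']') :
    ∀ (d idx : Nat), idx + d = j →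
      magAux s (s.toList.drop idx) idx (opensRev s.toList idx) =
      magAux s (s.toList.drop j) j (opensRev s.toList j) := by
  intro d
  induction d with
  | zero =>
    intro idx h
    have hij : idx = j := by omega
    subst hij
    rfl
  | succ e ih =>
    intro idx h
    have hjlen : j < s.toList.length := by
      by_contra hge
      rw [List.getElem?_eq_none_iff.mpr (by omega)] at hj
      simp at hj
    have hidx : idx < s.toList.length := by omega
    have hdrop : s.toList.drop idx = s.toList[idx] :: s.toList.drop (idx + 1) :=
      List.drop_eq_getElem_cons hidx
    have hne : ¬ (s.toList[idx] = ']') := by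
      intro hc
      exact hfirst idx (by omega) (by rw [List.getElem?_eq_getElem hidx, hc])
    rw [hdrop]
    by_cases hc1 : s.toList[idx] = '['
    · have step : magAux s (s.toList[idx] :: s.toList.drop (idx + 1)) idx (opensRev s.toList idx) =
          magAux s (s.toList.drop (idx + 1)) (idx + 1) (idx :: opensRev s.toList idx) := by
        conv_lhs => rw [magAux.eq_def]
        simp [hc1]
      rw [step]
      have hsucc : opensRev s.toList (idx + 1) = idx :: opensRev s.toList idx := by
        rw [opensRev_succ, if_pos (by rw [List.getElem?_eq_getElem hidx, hc1])]
      rw [← hsucc]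
      exact ih (idx + 1) (by omega)
    · have step : magAux s (s.toList[idx] :: s.toList.drop (idx + 1)) idx (opensRev s.toList idx) =
          magAux s (s.toList.drop (idx + 1)) (idx + 1) (opensRev s.toList idx) := by
        conv_lhs => rw [magAux.eq_def]
        simp [hc1, hne]
      rw [step]
      have hsucc : opensRev s.toList (idx + 1) = opensRev s.toList idx := by
        rw [opensRev_succ, if_neg (by rw [List.getElem?_eq_getElem hidx]; simp [hc1])]
      rw [← hsucc]
      exact ih (idx + 1) (by omega)

-- ===== VERDICT (by name: the statement is the Claim_ definition above) =====
theorem magnitude_step_spec : Claim_equal_magnitude_step := by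
  intro s _hdom hpre
  unfold Spec_magnitude_step
  by_cases hmem : ']' ∈ s.toList
  · -- there is a ']' : both sides reduce the leftmost leaf
    set cs := s.toList with hcs
    set j := List.idxOf ']' cs with hjdef
    obtain ⟨hj, hfirst⟩ := idxOf_spec cs hmem
    have hjlen : j < cs.length := by
      by_contra hge
      rw [List.getElem?_eq_none_iff.mpr (by omega)] at hj
      simp at hj
    -- unpack Pre_
    have hpre' := hpre hmem
    obtain ⟨hsome, hrest⟩ := hpre'
    obtain ⟨o, ho⟩ := Option.isSome_iff_exists.mp hsome
    rw [ho] at hrest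
    simp only [Option.getD_some] at hrest
    obtain ⟨hlen2, hall⟩ := hrest
    -- facts about o
    have homem : o ∈ (List.range j).filter (fun i => cs[i]? = some '[') :=
      List.mem_of_getLast? ho
    have holt : o < j := by
      have := (List.mem_filter.mp homem).1
      simpa using this
    have hoc : cs[o]? = some '[' := by
      have := (List.mem_filter.mp homem).2
      exact of_decide_eq_true this
    have hpw : ((List.range j).filter (fun i => cs[i]? = some '[')).Pairwise (· < ·) :=
      List.Pairwise.sublist (List.filter_sublist) (List.pairwise_lt_range)
    have hmaxopen : ∀ i, o < i → i < j → cs[i]? ≠ some '[' := by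
      intro i h1 h2 hic
      have : i ∈ (List.range j).filter (fun i => cs[i]? = some '[') :=
        List.mem_filter.mpr ⟨by simpa using h2, decide_eq_true hic⟩
      have := pw_le_getLast hpw ho i this
      omega
    -- the slice between the brackets
    have hmid : PySem.List.slice cs (some ((o : Int) + 1)) (some (j : Int)) =
        (cs.drop (o + 1)).take (j - (o + 1)) := by
      have : ((o : Int) + 1) = ((o + 1 : Nat) : Int) := by push_cast; ring
      rw [this, PySem.List.slice_natCast]
    have hmid' : List.drop (o + 1) (List.take j cs) = (cs.drop (o + 1)).take (j - (o + 1)) := by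
      rw [List.drop_take]
    set midL := (cs.drop (o + 1)).take (j - (o + 1)) with hmidL
    rw [hmid'] at hlen2 hall
    obtain ⟨vals, hvals, hvlen⟩ := mapM_isSome _ _ hall
    have hv2 : 2 ≤ vals.length := by rw [hvlen]; exact hlen2
    match vals, hvals, hv2 with
    | v0 :: v1 :: vr, hvals, _ =>
    -- no bracket occurs strictly between the matched '[' and ']'
    have hmemmid : ∀ x, x ∈ midL → ∃ i, o + 1 ≤ i ∧ i < j ∧ cs[i]? = some x := by
      intro x hx
      obtain ⟨k, hk, he⟩ := List.mem_iff_getElem.mp hx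
      have hk' : k < j - (o + 1) := by
        have := hk
        simp [hmidL] at this
        omega
      refine ⟨o + 1 + k, by omega, by omega, ?_⟩
      have h1 : midL[k]? = some x := by rw [List.getElem?_eq_getElem hk, he]
      rw [hmidL] at h1
      simp only [List.getElem?_take, List.getElem?_drop, hk', if_pos] at h1
      simpa using h1
    have hnoop : PySem.Chars.isIn ['['] midL = false := by
      rw [PySem.Chars.isIn_eq_false_iff, singleton_infix_iff]
      intro hx
      obtain ⟨i, h1, h2, h3⟩ := hmemmid '[' hx
      exact hmaxopen i (by omega) h2 h3
    have hnocl : PySem.Chars.isIn [']'] midL = false := by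
      rw [PySem.Chars.isIn_eq_false_iff, singleton_infix_iff]
      intro hx
      obtain ⟨i, h1, h2, h3⟩ := hmemmid ']' hx
      exact hfirst i h2 h3
    -- B's find and rfind
    have hfind : PySem.Chars.find cs [']'] = (j : Int) := find_singleton_eq cs ']' hmem
    have hjne : ((j : Int)) ≠ -1 := by omega
    have hrfind : PySem.Chars.rfindFrom cs ['['] 0 (some (j : Int)) = (o : Int) :=
      rfindFrom_singleton cs '[' j o (le_of_lt hjlen) holt hoc hmaxopen
    have hB : magnitude_step_alt s =
        (true, String.ofList (PySem.List.slice cs none (some (o : Int)) ++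
          (PySem.Int.toStr (3 * v0 + 2 * v1)).toList ++
          PySem.List.slice cs (some ((j : Int) + 1)) none)) := by
      unfold magnitude_step_alt
      simp only [PySem.Str.find_eq, PySem.Str.rfindFrom_eq, ← hcs]
      rw [show "]".toList = [']'] from rfl, show "[".toList = ['['] from rfl]
      rw [hfind, if_neg hjne, hrfind, hmid, hvals]
    -- A reaches the first ']' with the open positions on its stack
    have hstackh : (opensRev cs j).head? = some o := by
      unfold opensRev
      rw [List.head?_reverse]
      unfold lastOpenBefore at ho
      rw [← hjdef] at ho
      exact ho
    have hA : magnitude_step s =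
        (true, String.ofList (PySem.List.slice cs none (some (o : Int)) ++
          (PySem.Int.toStr (3 * v0 + 2 * v1)).toList ++
          PySem.List.slice cs (some ((j : Int) + 1)) none)) := by
      unfold magnitude_step
      have h0 : magAux s s.toList 0 [] = magAux s (cs.drop 0) 0 (opensRev cs 0) := by
        rw [← hcs]
        simp [opensRev]
      rw [h0, magAux_reaches s j hj (fun i hi => hfirst i hi) j 0 (by omega)]
      rw [← hcs]
      have hjget : cs[j] = ']' := by
        have := List.getElem?_eq_getElem hjlen
        rw [hj] at this
        exact (Option.some.injEq _ _).mp this.symm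
      cases hop : opensRev cs j with
      | nil => rw [hop] at hstackh; simp at hstackh
      | cons a t =>
        have hao : a = o := by
          rw [hop] at hstackh
          simpa using hstackh
        subst hao
        rw [List.drop_eq_getElem_cons hjlen, hjget]
        conv_lhs => rw [magAux.eq_def]
        simp only [← hcs, hmid, hnoop, hnocl, hvals]
        simp
    rw [hA, hB]

  · -- no ']' : both return (false, s)
    have hA : magnitude_step s = (false, s) := by
      unfold magnitude_step
      exact magAux_no_close s s.toList hmem 0 []
    have hB : magnitude_step_alt s = (false, s) := by
      unfold magnitude_step_alt
      have hfneg : PySem.Chars.find s.toList [']'] = -1 := by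
        rw [PySem.Chars.find_eq_neg_one_iff, singleton_infix_iff]
        exact hmem
      simp [hfneg]
    rw [hA, hB]
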